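-- pv_equiv track=rewrite | github.com/limits220284/CP | leetcode/1616.分割两个字符串得到回文串.py | checkPalindromeFormation
-- ===== SOURCE A (Python) =====
-- def checkPalindromeFormation(a: str, b: str) -> bool:
--     def check(a, b):
--         n = len(a)
--         left, right = 0, n-1
--         while left < right and a[left] == b[right]:
--             left += 1
--             right -= 1
--         if left >= right:
--             return True
--         s = a[left:right+1]
--         t = b[left:right+1]
--         return s == s[::-1] or t == t[::-1]
--     return check(a, b) or check(b, a)
-- ===== SOURCE B (Python) =====
-- def checkPalindromeFormation(a: str, b: str) -> bool:
--     n = len(a)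
--     for i in range(n + 1):
--         s1 = a[:i] + b[i:]
--         if s1 == s1[::-1]:
--             return True
--         s2 = b[:i] + a[i:]
--         if s2 == s2[::-1]:
--             return True
--     return False
-- ===== Notes on version B (the rewrite author's own statement) =====
-- stated objective: simpler
-- what changed: Replaces A's greedy two-pointer prefix-matching plus middle-palindrome check with a direct brute-force enumeration of all split points i in 0..n, testing whether a[:i]+b[i:] or b[:i]+a[i:] is a palindrome; Pre_ excludes unequal-length strings with len(a) >= 2 (outside the problem's stated domain), where A's index arithmetic usually raises IndexError and otherwise returns accidental values.
-- outside the precondition, e.g. on checkPalindromeFormation('ca', 'bca'): A returns True, B returns False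
import Mathlib
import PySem

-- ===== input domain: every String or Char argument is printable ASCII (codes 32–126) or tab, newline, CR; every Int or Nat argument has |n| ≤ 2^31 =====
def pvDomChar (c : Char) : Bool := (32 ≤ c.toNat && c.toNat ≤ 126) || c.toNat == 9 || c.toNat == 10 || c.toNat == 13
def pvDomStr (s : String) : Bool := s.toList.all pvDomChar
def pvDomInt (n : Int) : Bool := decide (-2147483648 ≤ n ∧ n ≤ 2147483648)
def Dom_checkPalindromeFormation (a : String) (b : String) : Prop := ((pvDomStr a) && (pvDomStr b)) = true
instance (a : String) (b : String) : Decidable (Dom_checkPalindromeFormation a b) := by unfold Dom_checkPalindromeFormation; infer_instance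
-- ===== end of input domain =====

-- B replaces A's greedy two-pointer matching with a brute-force scan over all split points (objective: simpler).

-- ===== PORT A =====
-- inner while-loop of check(a, b): state (left, right), Python indexing via pyGet?
def pvGo (a b : List Char) (left right : Int) : Bool :=
  if h : left < right ∧ PySem.List.pyGet? a left == PySem.List.pyGet? b right then
    pvGo a b (left + 1) (right - 1)
  else if left ≥ right then
    true
  else
    let s := PySem.List.slice a (some left) (some (right + 1))
    let t := PySem.List.slice b (some left) (some (right + 1))
    (s == s.reverse) || (t == t.reverse)
termination_by (right - left).toNat
decreasing_by
  have := h.1; omega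

-- check(a, b): n = len(a); left, right = 0, n-1; loop; then the branch (the branch lives in pvGo)
def pvCheck (a b : List Char) : Bool :=
  pvGo a b 0 ((a.length : Int) - 1)

def checkPalindromeFormation (a : String) (b : String) : Bool :=
  pvCheck a.toList b.toList || pvCheck b.toList a.toList

-- ===== PORT B =====
-- s == s[::-1]
def pvIsPal (l : List Char) : Bool := l == l.reverse

-- brute force: for i in range(n+1): test a[:i]+b[i:] and b[:i]+a[i:]; early return = List.any.
-- slices a[:i] / b[i:] with 0 ≤ i ≤ n are exactly take/drop.
def checkPalindromeFormation_alt (a : String) (b : String) : Bool :=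
  let al := a.toList
  let bl := b.toList
  (List.range (al.length + 1)).any (fun i =>
    pvIsPal (al.take i ++ bl.drop i) || pvIsPal (bl.take i ++ al.drop i))

-- ===== PRECONDITION & SPEC =====
-- Pre_ excludes unequal-length strings with len(a) >= 2 (outside the problem's stated domain):
-- there A's index arithmetic usually raises IndexError and otherwise returns accidental values.
def Pre_checkPalindromeFormation (a : String) (b : String) : Prop :=
  a.toList.length = b.toList.length ∨ a.toList.length ≤ 1
instance (a : String) (b : String) : Decidable (Pre_checkPalindromeFormation a b) := by
  unfold Pre_checkPalindromeFormation; infer_instance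

def pvWitness_checkPalindromeFormation : String × String := ("ab", "ba")

def Spec_checkPalindromeFormation (a : String) (b : String) (out : Bool) : Prop := out = checkPalindromeFormation_alt a b
instance (a : String) (b : String) (out : Bool) : Decidable (Spec_checkPalindromeFormation a b out) := by unfold Spec_checkPalindromeFormation; infer_instance

-- ===== CLAIM (what is proved, stated in full; the proofs are below) =====
def Claim_equal_checkPalindromeFormation : Prop := ∀ (a : String) (b : String), Dom_checkPalindromeFormation a b → Pre_checkPalindromeFormation a b → Spec_checkPalindromeFormation a b (checkPalindromeFormation a b)

-- ===== LEMMAS AND PROOFS =====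

-- l is a palindrome
def pvPal (l : List Char) : Prop := l = l.reverse

-- the first m characters of a match the last m characters of b, reversed
def pvM (a b : List Char) (m : Nat) : Prop := a.take m = (b.drop (b.length - m)).reverse

-- the middle slice x[m : len(x)-m]
def pvMid (x : List Char) (m : Nat) : List Char := (x.drop m).take (x.length - 2 * m)

-- common characterisation of both programs
def pvPhi (a b : List Char) (n m : Nat) : Prop :=
  2 * m ≤ n ∧ pvM a b m ∧ (pvPal (pvMid a m) ∨ pvPal (pvMid b m))

lemma pal_sandwich (x v w : List Char) (h : x.length = w.length) :
    pvPal (x ++ v ++ w) ↔ (w = x.reverse ∧ pvPal v) := by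
  unfold pvPal
  constructor
  · intro he
    have hrev : (x ++ v ++ w).reverse = w.reverse ++ (v.reverse ++ x.reverse) := by simp
    rw [hrev] at he
    have h1 : x ++ (v ++ w) = w.reverse ++ (v.reverse ++ x.reverse) := by
      simpa [List.append_assoc] using he
    obtain ⟨hx1, hx2⟩ := List.append_inj h1 (by simp [h])
    obtain ⟨hv1, hv2⟩ := List.append_inj hx2 (by simp)
    exact ⟨hv2, hv1⟩
  · rintro ⟨hw, hv⟩
    subst hw
    simp only [List.reverse_append, List.reverse_reverse, List.append_assoc]
    rw [← hv]

lemma pal_short (l : List Char) (h : l.length ≤ 1) : pvPal l := by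
  rcases l with _ | ⟨c, _ | ⟨d, t⟩⟩
  · rfl
  · rfl
  · simp at h

lemma M_get (a b : List Char) (n m k : Nat) (_hn : a.length = n) (hbn : b.length = n)
    (hm : m ≤ n) (hk : k < m) (h : pvM a b m) : a[k]? = b[n - 1 - k]? := by
  unfold pvM at h
  rw [hbn] at h
  have hlen : (b.drop (n - m)).length = m := by simp [hbn]; omega
  have h1 : (a.take m)[k]? = ((b.drop (n - m)).reverse)[k]? := by rw [h]
  rw [List.getElem?_take] at h1
  simp only [hk, if_pos] at h1
  rw [List.getElem?_reverse (by simp [hlen]; omega), hlen, List.getElem?_drop] at h1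
  rw [show n - m + (m - 1 - k) = n - 1 - k from by omega] at h1
  simpa using h1

lemma M_extend (a b : List Char) (n k : Nat) (hn : a.length = n) (hbn : b.length = n)
    (h2 : 2 * k < n) (hM : pvM a b k) (hmatch : a[k]? = b[n - 1 - k]?) : pvM a b (k + 1) := by
  unfold pvM at hM ⊢
  rw [hbn] at hM ⊢
  have hk : k < a.length := by omega
  have hk' : n - 1 - k < b.length := by omega
  rw [List.take_add_one]
  rw [show n - (k + 1) = n - 1 - k from by omega]
  rw [List.drop_eq_getElem_cons hk']
  rw [show n - 1 - k + 1 = n - k from by omega]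
  rw [List.reverse_cons, hM]
  congr 1
  have hb : b[n - 1 - k]? = some b[n - 1 - k] := List.getElem?_eq_getElem hk'
  rw [hmatch, hb]
  rfl

lemma mid_trim (x : List Char) (m k : Nat) (hmk : m ≤ k) (h2 : 2 * k ≤ x.length)
    (h : pvPal (pvMid x m)) : pvPal (pvMid x k) := by
  unfold pvMid at h ⊢
  have hdec : (x.drop m).take (x.length - 2 * m)
      = (x.drop m).take (k - m) ++ ((x.drop k).take (x.length - 2 * k) ++ (x.drop (x.length - k)).take (k - m)) := by
    rw [show x.length - 2 * m = (k - m) + ((x.length - 2 * k) + (k - m)) from by omega,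
        List.take_add, List.take_add, List.drop_drop, List.drop_drop]
    rw [show m + (k - m) = k from by omega, show k + (x.length - 2 * k) = x.length - k from by omega]
  rw [hdec, ← List.append_assoc] at h
  have hlen : ((x.drop m).take (k - m)).length = ((x.drop (x.length - k)).take (k - m)).length := by
    simp; omega
  exact ((pal_sandwich _ _ _ hlen).mp h).2

lemma go_spec (a b : List Char) (n : Nat) (hn : a.length = n) (hbn : b.length = n) :
    ∀ d k : Nat, n - 2 * k = d → 2 * k ≤ n → pvM a b k →
      (pvGo a b (k : Int) ((n : Int) - 1 - (k : Int)) = true ↔ ∃ m, pvPhi a b n m) := by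
  intro d
  induction d using Nat.strong_induction_on with
  | _ d IH =>
    intro k hd h2 hM
    rw [pvGo]
    split_ifs with hc hge
    · -- matched: recurse
      have hlt : 2 * k + 1 < n := by have := hc.1; omega
      have hmatch : a[k]? = b[n - 1 - k]? := by
        have hb := hc.2
        rw [beq_iff_eq, PySem.List.pyGet?_natCast,
            show ((n : Int) - 1 - (k : Int)) = ((n - 1 - k : Nat) : Int) from by omega,
            PySem.List.pyGet?_natCast] at hb
        exact hb
      have hM' : pvM a b (k + 1) := M_extend a b n k hn hbn (by omega) hM hmatch
      rw [show ((k : Int) + 1) = ((k + 1 : Nat) : Int) from by omega,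
          show ((n : Int) - 1 - (k : Int) - 1) = ((n : Int) - 1 - ((k + 1 : Nat) : Int)) from by omega]
      exact IH (n - 2 * (k + 1)) (by omega) (k + 1) rfl (by omega) hM'
    · -- left >= right: returns True
      refine iff_of_true rfl ⟨k, h2, hM, Or.inl (pal_short _ ?_)⟩
      have : 2 * k + 1 ≥ n := by omega
      simp [pvMid, hn]
      omega
    · -- mismatch: middle palindrome test
      have hlt : 2 * k + 1 < n := by omega
      have hne : ¬ (a[k]? = b[n - 1 - k]?) := by
        intro heq
        apply hc
        refine ⟨by omega, ?_⟩
        rw [beq_iff_eq, PySem.List.pyGet?_natCast,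
            show ((n : Int) - 1 - (k : Int)) = ((n - 1 - k : Nat) : Int) from by omega,
            PySem.List.pyGet?_natCast]
        exact heq
      have hs : PySem.List.slice a (some (k : Int)) (some ((n : Int) - 1 - (k : Int) + 1)) = pvMid a k := by
        rw [show ((n : Int) - 1 - (k : Int) + 1) = ((n - k : Nat) : Int) from by omega,
            PySem.List.slice_natCast, pvMid, hn, show n - k - k = n - 2 * k from by omega]
      have ht : PySem.List.slice b (some (k : Int)) (some ((n : Int) - 1 - (k : Int) + 1)) = pvMid b k := by
        rw [show ((n : Int) - 1 - (k : Int) + 1) = ((n - k : Nat) : Int) from by omega,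
            PySem.List.slice_natCast, pvMid, hbn, show n - k - k = n - 2 * k from by omega]
      simp only [hs, ht, Bool.or_eq_true, beq_iff_eq]
      constructor
      · intro hp
        exact ⟨k, by omega, hM, by simpa [pvPal] using hp⟩
      · rintro ⟨m, hm2, hmM, hmp⟩
        by_cases hmk : m ≤ k
        · rcases hmp with hpa | hpb
          · exact Or.inl (mid_trim a m k hmk (by omega) hpa)
          · exact Or.inr (mid_trim b m k hmk (by omega) hpb)
        · exact absurd (M_get a b n m k hn hbn (by omega) (by omega) hmM) hne

lemma pvCheck_spec (a b : List Char) (n : Nat) (hn : a.length = n) (hbn : b.length = n) :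
    pvCheck a b = true ↔ ∃ m, pvPhi a b n m := by
  unfold pvCheck
  rw [hn]
  have h := go_spec a b n hn hbn n 0 (by omega) (by omega) (by simp [pvM])
  simpa using h

lemma split_pal_low (a b : List Char) (n i : Nat) (hn : a.length = n) (hbn : b.length = n)
    (h2 : 2 * i ≤ n) :
    pvPal (a.take i ++ b.drop i) ↔ (pvM a b i ∧ pvPal (pvMid b i)) := by
  have hbd : b.drop i = pvMid b i ++ b.drop (n - i) := by
    unfold pvMid
    rw [hbn]
    conv_lhs => rw [← List.take_append_drop (n - 2 * i) (b.drop i)]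
    rw [List.drop_drop, show i + (n - 2 * i) = n - i from by omega]
  rw [hbd, ← List.append_assoc]
  rw [pal_sandwich _ _ _ (by simp [hn, hbn]; omega)]
  unfold pvM
  rw [hbn]
  constructor
  · rintro ⟨h1, h2⟩
    exact ⟨by rw [h1, List.reverse_reverse], h2⟩
  · rintro ⟨h1, h2⟩
    exact ⟨by rw [h1, List.reverse_reverse], h2⟩

lemma split_pal_high (a b : List Char) (n i : Nat) (hn : a.length = n) (hbn : b.length = n)
    (h2 : n ≤ 2 * i) (hi : i ≤ n) :
    pvPal (a.take i ++ b.drop i) ↔ (pvM a b (n - i) ∧ pvPal (pvMid a (n - i))) := by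
  have had : a.take i = a.take (n - i) ++ pvMid a (n - i) := by
    unfold pvMid
    rw [hn]
    rw [show i = (n - i) + (n - 2 * (n - i)) from by omega, List.take_add]
    rw [show (n - i) + (n - 2 * (n - i)) = i from by omega]
  rw [had]
  rw [pal_sandwich _ _ _ (by simp [hn, hbn])]
  unfold pvM
  rw [hbn, show n - (n - i) = i from by omega]
  constructor
  · rintro ⟨h1, h2⟩
    exact ⟨by rw [h1, List.reverse_reverse], h2⟩
  · rintro ⟨h1, h2⟩
    exact ⟨by rw [h1, List.reverse_reverse], h2⟩

lemma phi_iff_split (a b : List Char) (n : Nat) (hn : a.length = n) (hbn : b.length = n) :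
    ((∃ m, pvPhi a b n m) ∨ (∃ m, pvPhi b a n m)) ↔
      (∃ i, i ≤ n ∧ (pvPal (a.take i ++ b.drop i) ∨ pvPal (b.take i ++ a.drop i))) := by
  constructor
  · rintro (⟨m, hm2, hM, hpa | hpb⟩ | ⟨m, hm2, hM, hpb | hpa⟩)
    · refine ⟨n - m, by omega, Or.inl ((split_pal_high a b n (n - m) hn hbn (by omega) (by omega)).mpr ?_)⟩
      rw [show n - (n - m) = m from by omega]
      exact ⟨hM, hpa⟩
    · exact ⟨m, by omega, Or.inl ((split_pal_low a b n m hn hbn hm2).mpr ⟨hM, hpb⟩)⟩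
    · refine ⟨n - m, by omega, Or.inr ((split_pal_high b a n (n - m) hbn hn (by omega) (by omega)).mpr ?_)⟩
      rw [show n - (n - m) = m from by omega]
      exact ⟨hM, hpb⟩
    · exact ⟨m, by omega, Or.inr ((split_pal_low b a n m hbn hn hm2).mpr ⟨hM, hpa⟩)⟩
  · rintro ⟨i, hi, hp | hp⟩
    · by_cases hc : 2 * i ≤ n
      · obtain ⟨hM, hpal⟩ := (split_pal_low a b n i hn hbn hc).mp hp
        exact Or.inl ⟨i, hc, hM, Or.inr hpal⟩
      · obtain ⟨hM, hpal⟩ := (split_pal_high a b n i hn hbn (by omega) hi).mp hp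
        exact Or.inl ⟨n - i, by omega, hM, Or.inl hpal⟩
    · by_cases hc : 2 * i ≤ n
      · obtain ⟨hM, hpal⟩ := (split_pal_low b a n i hbn hn hc).mp hp
        exact Or.inr ⟨i, hc, hM, Or.inr hpal⟩
      · obtain ⟨hM, hpal⟩ := (split_pal_high b a n i hbn hn (by omega) hi).mp hp
        exact Or.inr ⟨n - i, by omega, hM, Or.inl hpal⟩

lemma alt_spec (a b : List Char) (n : Nat) (_hn : a.length = n) :
    ((List.range (n + 1)).any (fun i =>
      pvIsPal (a.take i ++ b.drop i) || pvIsPal (b.take i ++ a.drop i)) = true) ↔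
      (∃ i, i ≤ n ∧ (pvPal (a.take i ++ b.drop i) ∨ pvPal (b.take i ++ a.drop i))) := by
  rw [List.any_eq_true]
  constructor
  · rintro ⟨i, hmem, hf⟩
    rw [List.mem_range] at hmem
    refine ⟨i, by omega, ?_⟩
    simpa [pvIsPal, pvPal, Bool.or_eq_true, beq_iff_eq] using hf
  · rintro ⟨i, hi, hp⟩
    exact ⟨i, List.mem_range.mpr (by omega),
      by simpa [pvIsPal, pvPal, Bool.or_eq_true, beq_iff_eq] using hp⟩

lemma check_small (a b : List Char) (h : a.length ≤ 1) : pvCheck a b = true := by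
  unfold pvCheck
  rw [pvGo]
  split_ifs with hc hge
  · exact absurd hc.1 (by omega)
  · rfl
  · exact absurd (by omega : (0 : Int) ≥ (a.length : Int) - 1) hge

lemma alt_small (a b : List Char) (h : a.length ≤ 1) :
    (List.range (a.length + 1)).any (fun i =>
      pvIsPal (a.take i ++ b.drop i) || pvIsPal (b.take i ++ a.drop i)) = true := by
  apply List.any_eq_true.mpr
  refine ⟨0, List.mem_range.mpr (by omega), ?_⟩
  have hp : a = a.reverse := pal_short a h
  simp [pvIsPal, Bool.or_eq_true, beq_iff_eq]
  exact Or.inr hp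

-- ===== VERDICT (by name: the statement is the Claim_ definition above) =====
theorem checkPalindromeFormation_spec : Claim_equal_checkPalindromeFormation := by
  intro a b _hDom hPre
  unfold Spec_checkPalindromeFormation checkPalindromeFormation checkPalindromeFormation_alt
  set al := a.toList
  set bl := b.toList
  rcases hPre with heq | hle
  · have hlen : bl.length = al.length := heq.symm
    apply Bool.eq_iff_iff.mpr
    rw [Bool.or_eq_true,
        pvCheck_spec al bl al.length rfl hlen,
        pvCheck_spec bl al al.length hlen rfl,
        phi_iff_split al bl al.length rfl hlen]
    exact (alt_spec al bl al.length rfl).symm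
  · rw [check_small al bl hle, Bool.true_or, alt_small al bl hle]
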